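-- pv_equiv track=rewrite | github.com/NayanaChandrika99/mini-town | metrics/town_metric.py | _no_overlap
-- ===== SOURCE A (Python) =====
-- from typing import Dict, Iterable, List, Mapping, Optional, Tuple
--
-- def _no_overlap(step_times: List[Tuple[Optional[int], Optional[int]]]) -> bool:
--     sanitized: List[Tuple[int, int]] = []
--     for start, end in step_times:
--         if start is None or end is None:
--             return False
--         if start >= end:
--             return False
--         sanitized.append((start, end))
--     for idx in range(len(sanitized) - 1):
--         _, current_end = sanitized[idx]
--         next_start, _ = sanitized[idx + 1]
--         if current_end > next_start:
--             return False
--     return True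
-- ===== SOURCE B (Python) =====
-- from typing import List, Optional, Tuple
--
-- def _no_overlap(step_times: List[Tuple[Optional[int], Optional[int]]]) -> bool:
--     # Non-overlap of valid intervals in sequence == the flattened endpoint
--     # list [s1,e1,s2,e2,...] is non-decreasing and no interval is degenerate.
--     flat: List[int] = []
--     for s, e in step_times:
--         if s is None or e is None:
--             return False
--         flat.append(s)
--         flat.append(e)
--     return flat == sorted(flat) and all(s != e for s, e in step_times)
-- ===== Notes on version B (the rewrite author's own statement) =====
-- stated objective: alternative
-- what changed: B reduces non-overlap to a global property: it flattens all endpoints into one list and checks flat == sorted(flat) (monotonicity via sort-and-compare) plus non-degenerate intervals, instead of A's per-pair start<end checks and second adjacent-pair scan.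
import Mathlib
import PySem

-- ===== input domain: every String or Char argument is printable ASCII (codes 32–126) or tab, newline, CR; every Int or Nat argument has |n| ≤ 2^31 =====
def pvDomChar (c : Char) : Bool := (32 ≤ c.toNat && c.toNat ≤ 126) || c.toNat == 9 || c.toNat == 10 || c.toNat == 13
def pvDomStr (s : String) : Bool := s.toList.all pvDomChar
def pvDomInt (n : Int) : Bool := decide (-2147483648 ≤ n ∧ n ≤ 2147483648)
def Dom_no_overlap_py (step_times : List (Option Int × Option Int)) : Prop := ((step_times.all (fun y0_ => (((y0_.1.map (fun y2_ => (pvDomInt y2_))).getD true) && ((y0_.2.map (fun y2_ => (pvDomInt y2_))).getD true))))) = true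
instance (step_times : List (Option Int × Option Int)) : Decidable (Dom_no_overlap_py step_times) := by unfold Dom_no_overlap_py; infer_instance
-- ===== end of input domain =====

-- B replaces A's per-pair start<end checks plus second adjacent-pair scan by a global
-- sort-and-compare: flatten all endpoints and check flat == sorted(flat) and no degenerate interval.

-- ===== PORT A =====
-- first loop of A: validate each pair, building the sanitized list (none = early `return False`)
def noOverlapSanitize : List (Option Int × Option Int) → Option (List (Int × Int))
  | [] => some []
  | (start, end_) :: rest =>
    match start, end_ with
    | some s, some e =>
      if s ≥ e then none
      else (noOverlapSanitize rest).map (fun t => (s, e) :: t)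
    | _, _ => none

-- second loop of A: for idx in range(len-1), compare sanitized[idx].end with sanitized[idx+1].start
def noOverlapPairs : List (Int × Int) → Bool
  | (_, currentEnd) :: (nextStart, e₂) :: rest =>
    if currentEnd > nextStart then false else noOverlapPairs ((nextStart, e₂) :: rest)
  | _ => true

def no_overlap_py (step_times : List (Option Int × Option Int)) : Bool :=
  match noOverlapSanitize step_times with
  | none => false
  | some sanitized => noOverlapPairs sanitized

-- ===== PORT B =====
-- B's loop: collect flat = [s1, e1, s2, e2, ...] (none = early `return False` on a None field)
def noOverlapFlatten : List (Option Int × Option Int) → Option (List Int)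
  | [] => some []
  | (s, e) :: rest =>
    match s, e with
    | some a, some b => (noOverlapFlatten rest).map (fun t => a :: b :: t)
    | _, _ => none

def no_overlap_py_alt (step_times : List (Option Int × Option Int)) : Bool :=
  match noOverlapFlatten step_times with
  | none => false
  | some flat =>
    -- flat == sorted(flat) and all(s != e for s, e in step_times)
    (flat == PySem.List.sorted flat (fun x => x) false)
      && step_times.all (fun p => p.1 != p.2)

-- ===== PRECONDITION & SPEC =====
def Spec_no_overlap_py (step_times : List (Option Int × Option Int)) (out : Bool) : Prop := out = no_overlap_py_alt step_times
instance (step_times : List (Option Int × Option Int)) (out : Bool) : Decidable (Spec_no_overlap_py step_times out) := by unfold Spec_no_overlap_py; infer_instance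

-- ===== CLAIM (what is proved, stated in full; the proofs are below) =====
def Claim_equal_no_overlap_py : Prop := ∀ (step_times : List (Option Int × Option Int)), Dom_no_overlap_py step_times → Spec_no_overlap_py step_times (no_overlap_py step_times)

-- ===== LEMMAS AND PROOFS =====

-- the mapped form: a list of genuine (Int × Int) pairs wrapped back into Options
def wrapPairs (ps : List (Int × Int)) : List (Option Int × Option Int) :=
  ps.map (fun p => (some p.1, some p.2))

theorem flatten_none_sanitize (xs : List (Option Int × Option Int)) :
    noOverlapFlatten xs = none → noOverlapSanitize xs = none := by
  induction xs with
  | nil => simp [noOverlapFlatten]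
  | cons hd rest ih =>
    obtain ⟨s, e⟩ := hd
    match s, e with
    | some a, some b =>
      intro h
      have hr : noOverlapFlatten rest = none := by
        cases hh : noOverlapFlatten rest with
        | none => rfl
        | some t => simp [noOverlapFlatten, hh] at h
      simp [noOverlapSanitize, ih hr]
    | none, _ => intro _; simp [noOverlapSanitize]
    | some _, none => intro _; simp [noOverlapSanitize]

theorem flatten_some_wrap (xs : List (Option Int × Option Int)) (flat : List Int) :
    noOverlapFlatten xs = some flat → ∃ ps, xs = wrapPairs ps := by
  induction xs generalizing flat with
  | nil => intro _; exact ⟨[], rfl⟩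
  | cons hd rest ih =>
    obtain ⟨s, e⟩ := hd
    match s, e with
    | some a, some b =>
      intro h
      cases hh : noOverlapFlatten rest with
      | none => simp [noOverlapFlatten, hh] at h
      | some t =>
        obtain ⟨ps, hps⟩ := ih t hh
        exact ⟨(a, b) :: ps, by subst hps; simp [wrapPairs]⟩
    | none, _ => intro h; simp [noOverlapFlatten] at h
    | some _, none => intro h; simp [noOverlapFlatten] at h

def interleave (ps : List (Int × Int)) : List Int :=
  ps.flatMap (fun p => [p.1, p.2])

theorem flatten_wrap (ps : List (Int × Int)) :
    noOverlapFlatten (wrapPairs ps) = some (interleave ps) := by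
  induction ps with
  | nil => simp [wrapPairs, noOverlapFlatten, interleave]
  | cons hd rest ih => simp [wrapPairs, noOverlapFlatten, interleave] at ih ⊢; simp [ih]

-- A's first loop on a fully-Some list: none iff some pair is degenerate/reversed
theorem sanitize_wrap (ps : List (Int × Int)) :
    noOverlapSanitize (wrapPairs ps) =
      if ps.all (fun p => !decide (p.1 ≥ p.2)) then some ps else none := by
  induction ps with
  | nil => simp [wrapPairs, noOverlapSanitize]
  | cons hd rest ih =>
    obtain ⟨a, b⟩ := hd
    by_cases hab : a ≥ b
    · simp [wrapPairs, noOverlapSanitize, hab]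
    · have hstep : noOverlapSanitize (wrapPairs ((a, b) :: rest)) =
          (noOverlapSanitize (wrapPairs rest)).map (fun t => (a, b) :: t) := by
        simp [wrapPairs, noOverlapSanitize, hab]
      rw [hstep, ih]
      by_cases hall : rest.all (fun p => !decide (p.1 ≥ p.2)) = true <;>
        simp [hall, hab]

-- A's second loop is the chain condition e_i ≤ s_{i+1}
theorem pairs_iff_chain (ps : List (Int × Int)) :
    noOverlapPairs ps = true ↔ List.IsChain (fun p q => p.2 ≤ q.1) ps := by
  induction ps with
  | nil => simp [noOverlapPairs]
  | cons hd rest ih =>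
    cases rest with
    | nil => simp [noOverlapPairs]
    | cons nxt tl =>
      obtain ⟨s₁, e₁⟩ := hd
      obtain ⟨s₂, e₂⟩ := nxt
      rw [List.isChain_cons_cons]
      by_cases hov : e₁ > s₂
      · simp [noOverlapPairs, hov]
      · simp only [noOverlapPairs, if_neg hov]
        rw [ih]
        simp
        omega

-- monotone flattened list ↔ each pair weakly ordered ∧ chain between consecutive pairs
theorem chain_interleave (ps : List (Int × Int)) :
    List.IsChain (· ≤ ·) (interleave ps) ↔
      (∀ p ∈ ps, p.1 ≤ p.2) ∧ List.IsChain (fun p q : Int × Int => p.2 ≤ q.1) ps := by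
  induction ps with
  | nil => simp [interleave]
  | cons hd rest ih =>
    obtain ⟨a, b⟩ := hd
    cases rest with
    | nil => simp [interleave, List.isChain_cons_cons]
    | cons nxt tl =>
      obtain ⟨c, d⟩ := nxt
      have hint2 : interleave ((c, d) :: tl) = c :: d :: interleave tl := by
        simp [interleave]
      have hint : interleave ((a, b) :: (c, d) :: tl) = a :: b :: c :: d :: interleave tl := by
        simp [interleave]
      rw [hint, List.isChain_cons_cons, List.isChain_cons_cons,
          show (c :: d :: interleave tl) = interleave ((c, d) :: tl) from hint2.symm, ih,
          List.isChain_cons_cons]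
      constructor
      · rintro ⟨h1, h2, h3, h4⟩
        refine ⟨?_, h2, h4⟩
        intro p hp
        rcases List.mem_cons.mp hp with h | h
        · subst h; exact h1
        · exact h3 p h
      · rintro ⟨h3, h2, h4⟩
        exact ⟨h3 (a, b) (List.mem_cons_self ..), h2,
          fun p hp => h3 p (List.mem_cons_of_mem _ hp), h4⟩

-- flat == sorted(flat) ↔ flat is non-decreasing
theorem eq_sorted_iff_chain (flat : List Int) :
    (flat = PySem.List.sorted flat (fun x => x) false) ↔ List.IsChain (· ≤ ·) flat := by
  rw [List.isChain_iff_pairwise]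
  constructor
  · intro h
    have := PySem.List.sorted_pairwise (xs := flat) (key := fun x => x)
    rw [← h] at this
    exact this
  · intro h
    exact (PySem.List.sorted_eq_self_of_pairwise flat (fun x => x) (by simpa using h)).symm

-- main identity on fully-Some inputs
theorem wrap_eq (ps : List (Int × Int)) :
    no_overlap_py (wrapPairs ps) = no_overlap_py_alt (wrapPairs ps) := by
  unfold no_overlap_py no_overlap_py_alt
  rw [sanitize_wrap, flatten_wrap]
  have hall : (wrapPairs ps).all (fun p => p.1 != p.2) = ps.all (fun p => p.1 != p.2) := by
    simp [wrapPairs, List.all_map, Function.comp_def, bne]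
  by_cases hstrict : ps.all (fun p => !decide (p.1 ≥ p.2)) = true
  · -- every pair strictly increasing
    have hlt : ∀ p ∈ ps, p.1 < p.2 := by
      intro p hp
      have := (List.all_eq_true.mp hstrict) p hp
      simp at this; omega
    have hne : ps.all (fun p => p.1 != p.2) = true := by
      rw [List.all_eq_true]
      intro p hp
      have := hlt p hp; simp; omega
    by_cases hch : List.IsChain (fun p q : Int × Int => p.2 ≤ q.1) ps
    · have hc : List.IsChain (· ≤ ·) (interleave ps) :=
        (chain_interleave ps).mpr ⟨fun p hp => le_of_lt (hlt p hp), hch⟩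
      have hb : (interleave ps == PySem.List.sorted (interleave ps) (fun x => x) false) = true :=
        beq_iff_eq.mpr ((eq_sorted_iff_chain (interleave ps)).mpr hc)
      have hp1 : noOverlapPairs ps = true := (pairs_iff_chain ps).mpr hch
      simp [hstrict, hall, hne, hb, hp1]
    · have h1 : noOverlapPairs ps = false := by
        cases hv : noOverlapPairs ps
        · rfl
        · exact absurd ((pairs_iff_chain ps).mp hv) hch
      have h2 : (interleave ps == PySem.List.sorted (interleave ps) (fun x => x) false) = false := by
        rw [beq_eq_false_iff_ne]
        intro he
        exact hch ((chain_interleave ps).mp ((eq_sorted_iff_chain _).mp he)).2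
      simp [hstrict, hall, h1, h2]
  · -- some pair has p.1 ≥ p.2 : A gives false; B's conjunction is false too
    have hs' : ps.all (fun p => !decide (p.1 ≥ p.2)) = false := eq_false_of_ne_true hstrict
    have hex : ∃ p ∈ ps, p.2 ≤ p.1 := by
      obtain ⟨p, hp, hne⟩ := List.all_eq_false.mp hs'
      exact ⟨p, hp, by simpa using hne⟩
    obtain ⟨p, hp, hple⟩ := hex
    by_cases heq : interleave ps = PySem.List.sorted (interleave ps) (fun x => x) false
    · -- then p.1 ≤ p.2, so p.1 = p.2 and the all(s != e) conjunct is false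
      have hles := ((chain_interleave ps).mp ((eq_sorted_iff_chain _).mp heq)).1 p hp
      have hpe : p.1 = p.2 := le_antisymm hles hple
      have hf : ps.all (fun p => p.1 != p.2) = false := by
        cases hv : ps.all (fun p => p.1 != p.2)
        · rfl
        · have := (List.all_eq_true.mp hv) p hp
          simp [hpe] at this
      simp [hs', hall, hf]
    · simp [hs', hall, beq_eq_false_iff_ne.mpr heq]

-- ===== VERDICT (by name: the statement is the Claim_ definition above) =====
theorem no_overlap_py_spec : Claim_equal_no_overlap_py := by
  intro xs _
  unfold Spec_no_overlap_py
  cases h : noOverlapFlatten xs with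
  | none =>
    have hs := flatten_none_sanitize xs h
    simp [no_overlap_py, no_overlap_py_alt, h, hs]
  | some flat =>
    obtain ⟨ps, hps⟩ := flatten_some_wrap xs flat h
    rw [hps]
    exact wrap_eq ps
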